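-- pv_equiv track=rewrite | github.com/zeotq/mai-py-labs | 4.1/task_03.py | number_length
-- ===== SOURCE A (Python) =====
-- def number_length(n: int) -> int:
--     if n == 0:
--         return 1
--     n = abs(n)
--     len_n = 0
--     while n != 0:
--         len_n += 1
--         n //= 10
--     return len_n
-- ===== SOURCE B (Python) =====
-- def number_length(n: int) -> int:
--     return len(str(abs(n)))
-- ===== Notes on version B (the rewrite author's own statement) =====
-- stated objective: idiomatic
-- what changed: B measures the length of the decimal string of the absolute value (len(str(abs(n)))) instead of counting iterations of repeated floor-division, removing A's loop and its zero special case.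
import Mathlib
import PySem

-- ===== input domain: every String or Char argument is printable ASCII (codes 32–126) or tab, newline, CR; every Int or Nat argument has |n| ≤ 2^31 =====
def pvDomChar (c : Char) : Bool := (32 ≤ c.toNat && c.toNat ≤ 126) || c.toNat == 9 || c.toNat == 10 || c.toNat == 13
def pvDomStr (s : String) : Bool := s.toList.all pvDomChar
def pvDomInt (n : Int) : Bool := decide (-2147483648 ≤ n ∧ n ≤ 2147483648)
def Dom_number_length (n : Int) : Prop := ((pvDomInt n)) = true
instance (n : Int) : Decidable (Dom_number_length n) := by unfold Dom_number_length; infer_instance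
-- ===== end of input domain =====

-- B replaces A's divide-by-10 counting loop with the length of str(abs(n)); equivalence of the return values is proved for all n.

-- ===== PORT A =====
-- the while loop; after `n = abs(n)` the loop variable is a nonnegative int,
-- so it is carried as a Nat and Python's floor division on it is Nat division
def nlLoop (n len_n : Nat) : Nat :=
  if n ≠ 0 then nlLoop (n / 10) (len_n + 1) else len_n
termination_by n
decreasing_by exact Nat.div_lt_self (Nat.pos_of_ne_zero (by assumption)) (by omega)

def number_length (n : Int) : Int :=
  if n = 0 then 1 else (nlLoop n.natAbs 0 : Int)

-- ===== PORT B =====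
def number_length_alt (n : Int) : Int :=
  PySem.Str.len (PySem.Int.toStr |n|)

-- ===== PRECONDITION & SPEC =====
def Spec_number_length (n : Int) (out : Int) : Prop := out = number_length_alt n
instance (n : Int) (out : Int) : Decidable (Spec_number_length n out) := by unfold Spec_number_length; infer_instance

-- ===== CLAIM (what is proved, stated in full; the proofs are below) =====
def Claim_equal_number_length : Prop := ∀ (n : Int), Dom_number_length n → Spec_number_length n (number_length n)

-- ===== LEMMAS AND PROOFS =====
lemma nlLoop_eq (m : Nat) (hm : m ≠ 0) : ∀ k, nlLoop m k = k + (Nat.toDigits 10 m).length := by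
  induction m using Nat.strong_induction_on with
  | _ m ih =>
    intro k
    rw [nlLoop, if_pos hm]
    by_cases h10 : m < 10
    · rw [Nat.div_eq_of_lt h10, nlLoop, if_neg (by simp), Nat.toDigits_of_lt_base h10]
      simp
    · have hd : m / 10 ≠ 0 := by
        rw [Nat.div_ne_zero_iff]; omega
      rw [ih (m / 10) (Nat.div_lt_self (Nat.pos_of_ne_zero hm) (by omega)) hd (k + 1),
        Nat.toDigits_of_base_le (b := 10) (n := m) (by omega) (by omega)]
      simp [List.length_append]; omega

lemma alt_eq (n : Int) : number_length_alt n = ((Nat.toDigits 10 n.natAbs).length : Int) := by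
  have h0 : ¬ (|n| < 0) := not_lt.mpr (abs_nonneg n)
  simp only [number_length_alt, PySem.Str.len, PySem.Int.toStr, PySem.Int.toChars, if_neg h0,
    String.toList_ofList]
  have : |n|.toNat = n.natAbs := by rw [Int.abs_eq_natAbs, Int.toNat_natCast]
  rw [this]

-- ===== VERDICT (by name: the statement is the Claim_ definition above) =====
theorem number_length_spec : Claim_equal_number_length := by
  intro n _
  unfold Spec_number_length
  rw [alt_eq]
  by_cases hn : n = 0
  · subst hn; decide
  · rw [number_length, if_neg hn, nlLoop_eq n.natAbs (by omega) 0]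
    simp
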